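-- pv_equiv track=rewrite | github.com/liskos/jakov | ege25/146.py | delitel
-- ===== SOURCE A (Python) =====
-- def delitel(n):
--     a = set()
--     for i in range(2,int(n**0.5)+1):
--         if n % i == 0:
--             a.add(i)
--             a.add(n//i)
--     chet = [x for x in a if x % 2 == 0]
--
--     return sorted(a)[1]
-- ===== SOURCE B (Python) =====
-- def delitel(n):
--     # Second-smallest nontrivial divisor: find the smallest divisor p up to sqrt(n),
--     # then the next one in the same range; if none, the cofactor n//p is second-smallest.
--     r = int(n ** 0.5)
--     p = next(i for i in range(2, r + 1) if n % i == 0)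
--     q = next((i for i in range(p + 1, r + 1) if n % i == 0), None)
--     return q if q is not None else n // p
-- ===== Notes on version B (the rewrite author's own statement) =====
-- stated objective: alternative
-- what changed: Instead of collecting all divisor pairs (i, n//i) into a set over the whole range 2..isqrt(n) and sorting it, B finds the smallest nontrivial divisor p by an early-exit scan up to isqrt(n), then the next divisor in the same range, falling back to the cofactor n//p; no set and no sort, and both scans stop at the first hit; Pre_ excludes inputs on which A raises (negative n: TypeError at n**0.5; n with fewer than two nontrivial divisors: IndexError at sorted(a)[1]).
import Mathlib
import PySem

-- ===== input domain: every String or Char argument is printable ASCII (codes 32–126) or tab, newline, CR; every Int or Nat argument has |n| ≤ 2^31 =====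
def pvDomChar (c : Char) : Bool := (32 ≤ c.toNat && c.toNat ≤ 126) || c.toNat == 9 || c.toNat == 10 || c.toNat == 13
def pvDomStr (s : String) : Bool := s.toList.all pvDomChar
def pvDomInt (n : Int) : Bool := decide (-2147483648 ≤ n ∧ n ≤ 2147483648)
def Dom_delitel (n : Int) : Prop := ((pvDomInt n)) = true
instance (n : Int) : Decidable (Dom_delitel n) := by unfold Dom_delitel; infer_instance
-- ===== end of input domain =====

-- B finds the second-smallest nontrivial divisor by two early-exit linear scans up to √n
-- (smallest divisor p, then the next one, else the cofactor n//p) instead of A's set of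
-- all divisor pairs over the whole range plus a sort.

-- ===== PORT A =====
-- int(n**0.5) is ported as the integer square root Nat.sqrt n.toNat: exact on the whole
-- non-negative part of the input domain (|n| ≤ 2^31, where the double sqrt never misrounds
-- past an integer); for negative n Python raises TypeError, excluded by Pre_.
-- The list comprehension `chet` is dead code (never used) and is not ported.
def delitel (n : Int) : Int :=
  let a : PySem.Set Int :=
    (PySem.List.pyRange 2 ((Nat.sqrt n.toNat : Int) + 1) 1).foldl
      (fun a i =>
        if PySem.Int.mod n i == 0 then
          PySem.Set.add (PySem.Set.add a i) (PySem.Int.floordiv n i)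
        else a)
      PySem.Set.empty
  -- sorted(a)[1]; none = IndexError when a has fewer than two elements → excluded by Pre_
  (PySem.List.pyGet? (PySem.List.sorted a (fun x => x) false) 1).getD 0

-- ===== PORT B =====
-- next(i for i in range(j, r+1) if n % i == 0): first divisor of n in [j, r], else none
def pvFirstDiv (n r i : Int) : Option Int :=
  if _h : i ≤ r then
    if PySem.Int.mod n i == 0 then some i else pvFirstDiv n r (i + 1)
  else none
termination_by (r + 1 - i).toNat

def delitel_alt (n : Int) : Int :=
  let r : Int := (Nat.sqrt n.toNat : Int)   -- int(n ** 0.5)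
  match pvFirstDiv n r 2 with
  | none => 0          -- B's bare `next` raises StopIteration here: outside Pre_
  | some p =>
    match pvFirstDiv n r (p + 1) with
    | some j => j
    | none => PySem.Int.floordiv n p

-- ===== PRECONDITION & SPEC =====
-- integer square root by binary search on the value (kernel-reducible; used only by Pre_,
-- and only to bound the ∃ below so that it is decidable; it is not a copy of either port)
def pvSqrtGo (m : Nat) : Nat → Nat → Nat → Nat
  | 0, lo, _ => lo
  | fuel+1, lo, hi =>
    if hi ≤ lo + 1 then lo
    else
      let mid := (lo + hi) / 2
      if mid * mid ≤ m then pvSqrtGo m fuel mid hi else pvSqrtGo m fuel lo mid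
def pvSqrt (m : Nat) : Nat := pvSqrtGo m (m + 2) 0 (m + 1)

-- Pre_: exactly the inputs on which A returns: non-negative n (on negative n A raises
-- TypeError at n**0.5) having at least two nontrivial divisors, i.e. some divisor d with
-- d*d < n (else sorted(a)[1] raises IndexError); the ≤ √n bound only makes the ∃ checkable.
def Pre_delitel (n : Int) : Prop :=
  0 ≤ n ∧ ∃ d < pvSqrt n.toNat + 1, 2 ≤ d ∧ (d : Int) * d < n ∧ (d : Int) ∣ n
instance (n : Int) : Decidable (Pre_delitel n) := by unfold Pre_delitel; infer_instance

def pvWitness_delitel : Int := (12)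

def Spec_delitel (n : Int) (out : Int) : Prop := out = delitel_alt n
instance (n : Int) (out : Int) : Decidable (Spec_delitel n out) := by unfold Spec_delitel; infer_instance

-- ===== CLAIM (what is proved, stated in full; the proofs are below) =====
def Claim_equal_delitel : Prop := ∀ (n : Int), Dom_delitel n → Pre_delitel n → Spec_delitel n (delitel n)

-- ===== LEMMAS AND PROOFS =====

-- the ascending list of nontrivial divisors of n (the same expression Pre_ counts)
def pvDivs (n : Int) : List Int := (PySem.List.pyRange 2 n 1).filter (fun d => n % d == 0)

-- the set A builds
def pvASet (n : Int) : PySem.Set Int :=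
  (PySem.List.pyRange 2 ((Nat.sqrt n.toNat : Int) + 1) 1).foldl
    (fun a i =>
      if PySem.Int.mod n i == 0 then
        PySem.Set.add (PySem.Set.add a i) (PySem.Int.floordiv n i)
      else a)
    PySem.Set.empty

lemma delitel_eq_pyGet (n : Int) :
    delitel n
      = (PySem.List.pyGet? (PySem.List.sorted (pvASet n) (fun x => x) false) 1).getD 0 := rfl

lemma pvDivs_mem (n y : Int) : y ∈ pvDivs n ↔ 2 ≤ y ∧ y < n ∧ y ∣ n := by
  simp [pvDivs, PySem.List.mem_pyRange_one]
  tauto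

lemma pvDivs_pairwise (n : Int) : (pvDivs n).Pairwise (· < ·) :=
  (PySem.List.pairwise_lt_pyRange_one 2 n).filter _

lemma pvDivs_nodup (n : Int) : (pvDivs n).Nodup := (pvDivs_pairwise n).nodup

-- membership in the fold A runs
lemma pvFold_mem (n y : Int) (l : List Int) (s : PySem.Set Int) :
    y ∈ l.foldl (fun a i =>
        if PySem.Int.mod n i == 0 then
          PySem.Set.add (PySem.Set.add a i) (PySem.Int.floordiv n i)
        else a) s
      ↔ y ∈ s ∨ ∃ i ∈ l, PySem.Int.mod n i = 0 ∧ (y = i ∨ y = PySem.Int.floordiv n i) := by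
  induction l generalizing s with
  | nil => simp
  | cons x xs ih =>
    simp only [List.foldl_cons]
    split_ifs with h
    · rw [ih]
      simp only [beq_iff_eq] at h
      simp [PySem.Set.mem_add, h, or_assoc]
    · rw [ih]
      simp only [beq_iff_eq] at h
      simp [h]

lemma pvFold_nodup (n : Int) (l : List Int) (s : PySem.Set Int) (hs : s.Nodup) :
    (l.foldl (fun a i =>
        if PySem.Int.mod n i == 0 then
          PySem.Set.add (PySem.Set.add a i) (PySem.Int.floordiv n i)
        else a) s).Nodup := by
  induction l generalizing s with
  | nil => exact hs
  | cons x xs ih =>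
    simp only [List.foldl_cons]
    split_ifs with h
    · exact ih _ (PySem.Set.nodup_add _ _ (PySem.Set.nodup_add _ _ hs))
    · exact ih _ hs

-- i ≤ isqrt n ↔ i*i ≤ n  (nonneg arguments)
lemma pv_le_sqrt (n i : Int) (h0 : 0 ≤ i) (hn : 0 ≤ n) :
    i ≤ (Nat.sqrt n.toNat : Int) ↔ i * i ≤ n := by
  rw [← Int.toNat_of_nonneg h0, ← Int.toNat_of_nonneg hn]
  norm_cast
  exact Nat.le_sqrt

lemma pvASet_mem (n : Int) (hn : 0 ≤ n) (y : Int) : y ∈ pvASet n ↔ y ∈ pvDivs n := by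
  rw [pvASet, pvFold_mem, pvDivs_mem]
  constructor
  · rintro (hy | ⟨i, hi, hmod, hy⟩)
    · simp [PySem.Set.empty] at hy
    · rw [PySem.List.mem_pyRange_one] at hi
      obtain ⟨hi2, hilt⟩ := hi
      have hipos : 0 < i := by omega
      have hisq : i * i ≤ n := (pv_le_sqrt n i (by omega) hn).mp (by omega)
      have hidvd : i ∣ n := by
        rw [PySem.Int.mod_eq_emod_of_pos hipos] at hmod
        exact (PySem.Int.emod_eq_zero_iff_dvd n i).mp hmod
      obtain ⟨k, hk⟩ := hidvd
      have hfd : PySem.Int.floordiv n i = k := by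
        rw [PySem.Int.floordiv_eq_ediv_of_pos hipos, hk,
          Int.mul_ediv_cancel_left k (by omega)]
      have hik : i ≤ k := by nlinarith
      rcases hy with rfl | rfl
      · exact ⟨by omega, by nlinarith, ⟨k, hk⟩⟩
      · rw [hfd]
        exact ⟨by omega, by nlinarith, ⟨i, by rw [hk]; ring⟩⟩
  · rintro ⟨hy2, hylt, k, hk⟩
    right
    have hypos : 0 < y := by omega
    have hk2 : 2 ≤ k := by nlinarith
    by_cases hsq : y * y ≤ n
    · refine ⟨y, ?_, ?_, Or.inl rfl⟩
      · rw [PySem.List.mem_pyRange_one]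
        have := (pv_le_sqrt n y (by omega) hn).mpr hsq
        omega
      · rw [PySem.Int.mod_eq_emod_of_pos hypos]
        exact (PySem.Int.emod_eq_zero_iff_dvd n y).mpr ⟨k, hk⟩
    · refine ⟨k, ?_, ?_, Or.inr ?_⟩
      · rw [PySem.List.mem_pyRange_one]
        have hky : k < y := by nlinarith
        have : k * k ≤ n := by nlinarith
        have := (pv_le_sqrt n k (by omega) hn).mpr this
        omega
      · rw [PySem.Int.mod_eq_emod_of_pos (show (0:Int) < k by omega)]
        exact (PySem.Int.emod_eq_zero_iff_dvd n k).mpr ⟨y, by rw [hk]; ring⟩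
      · rw [PySem.Int.floordiv_eq_ediv_of_pos (show (0:Int) < k by omega), hk, mul_comm,
          Int.mul_ediv_cancel_left y (by omega)]

lemma pvSorted (n : Int) (hn : 0 ≤ n) :
    PySem.List.sorted (pvASet n) (fun x => x) false = pvDivs n := by
  apply PySem.List.sorted_eq_of_perm_of_pairwise_lt
  · exact (List.perm_ext_iff_of_nodup (pvDivs_nodup n)
      (pvFold_nodup n _ _ List.nodup_nil)).mpr
      (fun y => ((pvASet_mem n hn y).symm))
  · exact pvDivs_pairwise n

-- pairwise-< index monotonicity for pvDivs
lemma pvDivs_getElem_lt (n : Int) {a b : Nat} (hab : a < b) (hb : b < (pvDivs n).length) :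
    (pvDivs n)[a]'(by omega) < (pvDivs n)[b]'hb :=
  List.pairwise_iff_getElem.mp (pvDivs_pairwise n) a b (by omega) hb hab

lemma pvDivs_min0 (n : Int) (h2 : 2 ≤ (pvDivs n).length) :
    ∀ y ∈ pvDivs n, (pvDivs n)[0]'(by omega) ≤ y := by
  intro y hy
  obtain ⟨k, hk, rfl⟩ := List.mem_iff_getElem.mp hy
  rcases Nat.eq_zero_or_pos k with rfl | hpos
  · exact le_refl _
  · exact le_of_lt (pvDivs_getElem_lt n hpos hk)

lemma pvDivs_min1 (n : Int) (h2 : 2 ≤ (pvDivs n).length) :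
    ∀ y ∈ pvDivs n, y ≠ (pvDivs n)[0]'(by omega) → (pvDivs n)[1]'(by omega) ≤ y := by
  intro y hy hne
  obtain ⟨k, hk, rfl⟩ := List.mem_iff_getElem.mp hy
  match k with
  | 0 => exact absurd rfl hne
  | 1 => exact le_refl _
  | (m+2) => exact le_of_lt (pvDivs_getElem_lt n (by omega) hk)

-- pvFirstDiv specifications
lemma pvFirstDiv_some (n r i j : Int) (h0 : 0 ≤ i) (h : pvFirstDiv n r i = some j) :
    i ≤ j ∧ j ≤ r ∧ j ∣ n ∧ ∀ k, i ≤ k → k < j → ¬ k ∣ n := by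
  fun_induction pvFirstDiv n r i with
  | case1 i hle hmod =>
    simp only [Option.some.injEq] at h
    subst h
    refine ⟨le_refl _, hle, ?_, fun k hk1 hk2 _ => absurd hk2 (by omega)⟩
    exact (PySem.Int.mod_eq_zero_iff_dvd n i).mp (by simpa using hmod)
  | case2 i hle hmod ih =>
    obtain ⟨h1, h2, h3, h4⟩ := ih (by omega) h
    refine ⟨by omega, h2, h3, ?_⟩
    intro k hk1 hk2 hkd
    rcases eq_or_lt_of_le hk1 with heq | hlt
    · rw [← heq] at hkd
      exact absurd ((PySem.Int.mod_eq_zero_iff_dvd n i).mpr hkd) (by simpa using hmod)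
    · exact h4 k (by omega) hk2 hkd
  | case3 i hle => simp at h

lemma pvFirstDiv_none (n r i : Int) (h0 : 0 ≤ i) (h : pvFirstDiv n r i = none) :
    ∀ k, i ≤ k → k ≤ r → ¬ k ∣ n := by
  fun_induction pvFirstDiv n r i with
  | case1 i hle hmod => simp at h
  | case2 i hle hmod ih =>
    intro k hk1 hk2 hkd
    rcases eq_or_lt_of_le hk1 with heq | hlt
    · rw [← heq] at hkd
      exact absurd ((PySem.Int.mod_eq_zero_iff_dvd n i).mpr hkd) (by simpa using hmod)
    · exact ih (by omega) h k (by omega) hk2 hkd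
  | case3 i hle =>
    intro k hk1 hk2 hkd
    omega

-- evaluation of delitel_alt on the scan outcomes
lemma delitel_alt_some_some (n p j : Int) (h1 : pvFirstDiv n (Nat.sqrt n.toNat : Int) 2 = some p)
    (h2 : pvFirstDiv n (Nat.sqrt n.toNat : Int) (p + 1) = some j) : delitel_alt n = j := by
  simp only [delitel_alt, h1, h2]

lemma delitel_alt_some_none (n p : Int) (h1 : pvFirstDiv n (Nat.sqrt n.toNat : Int) 2 = some p)
    (h2 : pvFirstDiv n (Nat.sqrt n.toNat : Int) (p + 1) = none) :
    delitel_alt n = PySem.Int.floordiv n p := by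
  simp only [delitel_alt, h1, h2]

-- the precondition gives two distinct nontrivial divisors, hence length ≥ 2
lemma pvPre_len (n : Int) (h : Pre_delitel n) : 2 ≤ (pvDivs n).length := by
  obtain ⟨hn, d', _, hd2', hsq, hdvd⟩ := h
  set d : Int := (d' : Int) with hd
  have hd2 : (2 : Int) ≤ d := by rw [hd]; exact_mod_cast hd2'
  obtain ⟨k, hk⟩ := hdvd
  have hdk : d < k := by nlinarith
  have hdm : d ∈ pvDivs n := (pvDivs_mem n d).mpr ⟨hd2, by nlinarith, ⟨k, hk⟩⟩
  have hkm : k ∈ pvDivs n := (pvDivs_mem n k).mpr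
    ⟨by omega, by nlinarith, ⟨d, by linarith [hk, mul_comm d k]⟩⟩
  have hsub : ({d, k} : Finset Int) ⊆ (pvDivs n).toFinset := by
    intro x hx
    simp only [Finset.mem_insert, Finset.mem_singleton] at hx
    rcases hx with rfl | rfl
    · simpa using hdm
    · simpa using hkm
  have hcard : ({d, k} : Finset Int).card = 2 := by
    rw [Finset.card_insert_of_notMem (by simp; omega), Finset.card_singleton]
  have := Finset.card_le_card hsub
  rwa [hcard, List.toFinset_card_of_nodup (pvDivs_nodup n)] at this

theorem delitel_spec : Claim_equal_delitel := by
  intro n _hdom hpre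
  have hn : 0 ≤ n := hpre.1
  have h2 : 2 ≤ (pvDivs n).length := pvPre_len n hpre
  -- A's value is the second element of the ascending nontrivial-divisor list
  have hlen1 : 1 < (pvDivs n).length := by omega
  have hA : delitel n = (pvDivs n)[1]'hlen1 := by
    rw [delitel_eq_pyGet, pvSorted n hn]
    rw [show ((1 : Int) = ((1 : Nat) : Int)) from rfl,
      PySem.List.pyGet?_natCast, List.getElem?_eq_getElem hlen1]
    rfl
  rw [Spec_delitel, hA]
  have h0mem : (pvDivs n)[0]'(by omega) ∈ pvDivs n := List.getElem_mem _
  have h1mem : (pvDivs n)[1]'(by omega) ∈ pvDivs n := List.getElem_mem _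
  have h01 : (pvDivs n)[0]'(by omega) < (pvDivs n)[1]'(by omega) := pvDivs_getElem_lt n (by omega) (by omega)
  obtain ⟨hd02, hd0lt, hd0dvd⟩ := (pvDivs_mem n _).mp h0mem
  obtain ⟨hd12, hd1lt, hd1dvd⟩ := (pvDivs_mem n _).mp h1mem
  have hnpos : 0 < n := by omega
  -- the smallest nontrivial divisor has square ≤ n, hence lies within the scan bound
  have hsq0 : (pvDivs n)[0]'(by omega) * (pvDivs n)[0]'(by omega) ≤ n := by
    by_contra hgt
    rw [not_le] at hgt
    obtain ⟨k, hk⟩ := hd0dvd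
    have hk2 : 2 ≤ k := by nlinarith
    have hkmem : k ∈ pvDivs n := (pvDivs_mem n k).mpr ⟨hk2, by nlinarith, ⟨(pvDivs n)[0]'(by omega), by linarith [hk, mul_comm ((pvDivs n)[0]'(by omega)) k]⟩⟩
    have := pvDivs_min0 n h2 k hkmem
    nlinarith
  have hr0 : (pvDivs n)[0]'(by omega) ≤ (Nat.sqrt n.toNat : Int) :=
    (pv_le_sqrt n _ (by omega) hn).mpr hsq0
  -- run B
  cases hscan1 : pvFirstDiv n (Nat.sqrt n.toNat : Int) 2 with
  | none =>
    exact absurd hd0dvd (pvFirstDiv_none n _ 2 (by omega) hscan1 _ hd02 hr0)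
  | some p =>
    obtain ⟨hp2, hpr, hpdvd, hpmin⟩ := pvFirstDiv_some n _ 2 p (by omega) hscan1
    have hpsq : p * p ≤ n := (pv_le_sqrt n p (by omega) hn).mp hpr
    have hpL : p ∈ pvDivs n := (pvDivs_mem n p).mpr ⟨by omega, by nlinarith, hpdvd⟩
    have hp0 : p = (pvDivs n)[0]'(by omega) := by
      have h1 := pvDivs_min0 n h2 p hpL
      have h2' : ¬ (pvDivs n)[0]'(by omega) < p := fun hlt => hpmin _ hd02 hlt hd0dvd
      omega
    cases hscan2 : pvFirstDiv n (Nat.sqrt n.toNat : Int) (p + 1) with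
    | some j =>
      obtain ⟨hj1, hjr, hjdvd, hjmin⟩ := pvFirstDiv_some n _ (p+1) j (by omega) hscan2
      have hjsq : j * j ≤ n := (pv_le_sqrt n j (by omega) hn).mp hjr
      have hjL : j ∈ pvDivs n := (pvDivs_mem n j).mpr ⟨by omega, by nlinarith, hjdvd⟩
      have hle1 : (pvDivs n)[1]'(by omega) ≤ j := pvDivs_min1 n h2 j hjL (by omega)
      have hle2 : ¬ (pvDivs n)[1]'(by omega) < j := by
        intro hlt
        exact hjmin _ (by omega) hlt hd1dvd
      rw [delitel_alt_some_some n p j hscan1 hscan2]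
      omega
    | none =>
      have hnone := pvFirstDiv_none n _ (p+1) (by omega) hscan2
      obtain ⟨q, hq⟩ := hpdvd
      have hfd : PySem.Int.floordiv n p = q := by
        rw [PySem.Int.floordiv_eq_ediv_of_pos (show (0:Int) < p by omega), hq,
          Int.mul_ediv_cancel_left q (by omega)]
      have hq2 : 2 ≤ q := by nlinarith
      -- every nontrivial divisor is p or q
      have hall : ∀ e ∈ pvDivs n, e = p ∨ e = q := by
        intro e heL
        obtain ⟨he2, helt, hedvd⟩ := (pvDivs_mem n e).mp heL
        rcases le_or_gt e p with hle | hgt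
        · left
          have := pvDivs_min0 n h2 e heL
          omega
        · right
          have hesq : n < e * e := by
            by_contra hle'
            rw [not_lt] at hle'
            exact hnone e (by omega) ((pv_le_sqrt n e (by omega) hn).mpr hle') hedvd
          obtain ⟨c, hc⟩ := hedvd
          have hc2 : 2 ≤ c := by nlinarith
          have hce : c < e := by nlinarith
          have hcdvd : c ∣ n := ⟨e, by linarith [hc, mul_comm e c]⟩
          have hcmem : c ∈ pvDivs n := (pvDivs_mem n c).mpr ⟨hc2, by nlinarith, hcdvd⟩
          have hcp : p ≤ c := by
            have := pvDivs_min0 n h2 c hcmem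
            omega
          have hccn : c * c ≤ n := by
            nlinarith [mul_lt_mul_of_pos_right hce (show (0:Int) < c by omega), hc]
          have hcp' : ¬ p + 1 ≤ c := fun hge =>
            hnone c hge ((pv_le_sqrt n c (by omega) hn).mpr hccn) hcdvd
          have hcpe : c = p := by omega
          rw [hcpe] at hc
          have hpe : p * e = p * q := by linarith [hc, hq, mul_comm e p]
          exact mul_left_cancel₀ (show p ≠ 0 by omega) hpe
      have hq1 : (pvDivs n)[1]'(by omega) = q := by
        rcases hall _ h1mem with h | h
        · omega
        · exact h
      rw [delitel_alt_some_none n p hscan1 hscan2, hfd]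
      exact hq1
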